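-- pv_equiv track=rewrite | github.com/jdum/odfdo | odfdo/meta.py | _is_RFC3066
-- ===== SOURCE A (Python) =====
-- from string import ascii_letters, digits
--
-- def _is_RFC3066(lang: str) -> bool:
--     def test_part1(part1: str) -> bool:
--         if not 2 <= len(part1) <= 3:
--             return False
--         return all(x in ascii_letters for x in part1)
--
--     def test_part2(part2: str) -> bool:
--         return all(x in ascii_letters or x in digits for x in part2)
--
--     if not lang or not isinstance(lang, str):
--         return False
--     if "-" not in lang:
--         return test_part1(lang)
--     parts = lang.split("-")
--     if len(parts) > 3:
--         return False
--     if not test_part1(parts[0]):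
--         return False
--     return all(test_part2(p) for p in parts[1:])
-- ===== SOURCE B (Python) =====
-- def _is_RFC3066(lang: str) -> bool:
--     # single left-to-right pass with a tiny state machine: no splitting, no sublists
--     if not lang or not isinstance(lang, str):
--         return False
--     part = 0      # index of the current '-'-separated part (0, 1 or 2)
--     n0 = 0        # number of characters seen in part 0
--     for ch in lang:
--         if ch == "-":
--             part += 1
--             if part > 2:
--                 return False
--         elif part == 0:
--             if not ch.isascii() or not ch.isalpha():
--                 return False
--             n0 += 1
--         else:
--             if not ch.isascii() or not (ch.isalpha() or ch.isdigit()):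
--                 return False
--     return 2 <= n0 <= 3
-- ===== Notes on version B (the rewrite author's own statement) =====
-- stated objective: alternative
-- what changed: B replaces A's split-into-parts-then-validate-each-part logic by a single left-to-right pass over the characters with a tiny state machine (current part index, letter count of part 0), never materializing the part lists.
import Mathlib
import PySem

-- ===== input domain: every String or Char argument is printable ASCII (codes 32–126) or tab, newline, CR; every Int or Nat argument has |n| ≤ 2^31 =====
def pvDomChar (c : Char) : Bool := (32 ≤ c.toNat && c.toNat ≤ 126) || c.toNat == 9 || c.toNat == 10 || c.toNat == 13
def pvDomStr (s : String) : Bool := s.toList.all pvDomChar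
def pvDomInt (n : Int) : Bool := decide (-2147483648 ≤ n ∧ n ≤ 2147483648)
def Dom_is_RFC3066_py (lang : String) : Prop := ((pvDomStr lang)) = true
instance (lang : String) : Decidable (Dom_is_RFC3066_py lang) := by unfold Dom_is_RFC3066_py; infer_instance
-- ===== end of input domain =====

-- B validates the tag in one left-to-right pass with a small state machine instead of
-- splitting into parts and validating each part (objective: alternative, same cost).

set_option maxRecDepth 4096

-- ===== PORT A =====
-- string.ascii_letters and string.digits as character lists
def pvAsciiLetters : List Char :=
  ['a','b','c','d','e','f','g','h','i','j','k','l','m','n','o','p','q','r','s','t','u','v','w','x','y','z',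
   'A','B','C','D','E','F','G','H','I','J','K','L','M','N','O','P','Q','R','S','T','U','V','W','X','Y','Z']
def pvDigitChars : List Char := ['0','1','2','3','4','5','6','7','8','9']
def pvTestPart1 (part1 : List Char) : Bool :=
  if ¬ (2 ≤ part1.length ∧ part1.length ≤ 3) then false
  else part1.all (fun x => PySem.Chars.isIn [x] pvAsciiLetters)
def pvTestPart2 (part2 : List Char) : Bool :=
  part2.all (fun x => PySem.Chars.isIn [x] pvAsciiLetters || PySem.Chars.isIn [x] pvDigitChars)

def is_RFC3066_py (lang : String) : Bool :=
  if lang.toList = [] then false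
  else if PySem.Chars.isIn ['-'] lang.toList = false then pvTestPart1 lang.toList
  else
    let parts := PySem.Chars.splitOn lang.toList ['-']
    if parts.length > 3 then false
    else if pvTestPart1 (parts.headD []) = false then false
    else (parts.drop 1).all pvTestPart2

-- ===== PORT B =====
-- the single-pass loop of Source B: `part` = index of the current '-'-separated part, `n0` = chars
-- seen in part 0; ch.isascii() is ported by hand as c.toNat ≤ 127 (exact), isalpha/isdigit via PySem.Chars
def pvAltLoop : List Char → Nat → Nat → Bool
  | [], _, n0 => decide (2 ≤ n0 ∧ n0 ≤ 3)
  | c :: rest, part, n0 =>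
    if c = '-' then
      if part + 1 > 2 then false else pvAltLoop rest (part + 1) n0
    else if part = 0 then
      if decide (c.toNat ≤ 127) && PySem.Chars.isalpha c then pvAltLoop rest 0 (n0 + 1)
      else false
    else
      if decide (c.toNat ≤ 127) && (PySem.Chars.isalpha c || PySem.Chars.isdigit c) then pvAltLoop rest part n0
      else false

def is_RFC3066_py_alt (lang : String) : Bool :=
  if lang.toList = [] then false
  else pvAltLoop lang.toList 0 0

-- ===== PRECONDITION & SPEC =====
def Spec_is_RFC3066_py (lang : String) (out : Bool) : Prop := out = is_RFC3066_py_alt lang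
instance (lang : String) (out : Bool) : Decidable (Spec_is_RFC3066_py lang out) := by unfold Spec_is_RFC3066_py; infer_instance

-- ===== CLAIM (what is proved, stated in full; the proofs are below) =====
def Claim_equal_is_RFC3066_py : Prop := ∀ (lang : String), Dom_is_RFC3066_py lang → Spec_is_RFC3066_py lang (is_RFC3066_py lang)

-- ===== LEMMAS AND PROOFS =====

def pvSplitD : List Char → List (List Char)
  | [] => [[]]
  | c :: rest =>
    if c = '-' then [] :: pvSplitD rest
    else match pvSplitD rest with
      | [] => [[c]]
      | p :: ps => (c :: p) :: ps
lemma pvSplitD_ne_nil (cs : List Char) : pvSplitD cs ≠ [] := by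
  cases cs with
  | nil => simp [pvSplitD]
  | cons c rest =>
    simp only [pvSplitD]
    split <;> simp
    split <;> simp
-- B-side character predicates (abbreviations used only in proofs)
def pvLet (c : Char) : Bool := decide (c.toNat ≤ 127) && PySem.Chars.isalpha c
def pvAl (c : Char) : Bool := decide (c.toNat ≤ 127) && (PySem.Chars.isalpha c || PySem.Chars.isdigit c)
def pvP2B (p : List Char) : Bool := p.all pvAl


lemma pvAltLoop_dash (rest : List Char) (part n0 : Nat) :
    pvAltLoop ('-' :: rest) part n0 = if part + 1 > 2 then false else pvAltLoop rest (part + 1) n0 := by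
  simp [pvAltLoop]

lemma pvAltLoop_char (c : Char) (rest : List Char) (part n0 : Nat) (hc : c ≠ '-') :
    pvAltLoop (c :: rest) part n0 =
      if part = 0 then (if pvLet c then pvAltLoop rest 0 (n0 + 1) else false)
      else (if pvAl c then pvAltLoop rest part n0 else false) := by
  simp [pvAltLoop, hc, pvLet, pvAl]

lemma pvSplitD_dash (rest : List Char) : pvSplitD ('-' :: rest) = [] :: pvSplitD rest := by
  simp [pvSplitD]

lemma pvSplitD_char (c : Char) (rest : List Char) (hc : c ≠ '-') (p : List Char) (ps : List (List Char))
    (hsp : pvSplitD rest = p :: ps) : pvSplitD (c :: rest) = (c :: p) :: ps := by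
  simp [pvSplitD, hc, hsp]

lemma pv_loop_pos (cs : List Char) : ∀ (part n0 : Nat), part = 1 ∨ part = 2 →
    pvAltLoop cs part n0 =
      (decide (2 ≤ n0 ∧ n0 ≤ 3) && decide ((pvSplitD cs).length + part ≤ 3) &&
       (pvSplitD cs).all pvP2B) := by
  induction cs with
  | nil =>
    intro part n0 hp
    rcases hp with h|h <;> subst h <;> simp [pvAltLoop, pvSplitD, pvP2B] <;> omega
  | cons c rest ih =>
    intro part n0 hp
    by_cases hc : c = '-'
    · subst hc
      rw [pvAltLoop_dash, pvSplitD_dash]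
      rcases hp with h|h
      · subst h
        rw [if_neg (by omega), ih 2 n0 (Or.inr rfl)]
        have h2 : pvP2B [] = true := by simp [pvP2B]
        simp only [List.all_cons, h2, Bool.true_and, List.length_cons,
          show ((pvSplitD rest).length + 2 ≤ 3) ↔ ((pvSplitD rest).length + 1 + 1 ≤ 3) from by omega]
        rfl
      · subst h
        rw [if_pos (by omega)]
        have hlen := pvSplitD_ne_nil rest
        have h3 : (decide ((([] : List Char) :: pvSplitD rest).length + 2 ≤ 3)) = false := by
          simp only [decide_eq_false_iff_not, List.length_cons]
          cases hsp : pvSplitD rest with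
          | nil => exact absurd hsp hlen
          | cons p ps => simp
        rw [h3]
        simp
    · have hpart : part ≠ 0 := by rcases hp with h|h <;> omega
      cases hsp : pvSplitD rest with
      | nil => exact absurd hsp (pvSplitD_ne_nil rest)
      | cons p ps =>
        rw [pvAltLoop_char c rest part n0 hc, if_neg hpart, pvSplitD_char c rest hc p ps hsp]
        cases hal : pvAl c with
        | true =>
          rw [if_pos rfl, ih part n0 hp, hsp]
          have h5 : pvP2B (c :: p) = pvP2B p := by simp [pvP2B, List.all_cons, hal]
          simp only [List.all_cons, List.length_cons, h5]
          rfl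
        | false =>
          rw [if_neg (by simp [hal])]
          have h5 : pvP2B (c :: p) = false := by simp [pvP2B, List.all_cons, hal]
          simp [List.all_cons, h5]

lemma pv_loop_zero (cs : List Char) : ∀ n0 : Nat,
    pvAltLoop cs 0 n0 =
      (decide ((pvSplitD cs).length ≤ 3) &&
       (decide (2 ≤ n0 + ((pvSplitD cs).headD []).length ∧ n0 + ((pvSplitD cs).headD []).length ≤ 3) &&
        ((pvSplitD cs).headD []).all pvLet) &&
       ((pvSplitD cs).tail).all pvP2B) := by
  induction cs with
  | nil =>
    intro n0
    simp [pvAltLoop, pvSplitD]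
  | cons c rest ih =>
    intro n0
    by_cases hc : c = '-'
    · subst hc
      rw [pvAltLoop_dash, if_neg (by omega), pv_loop_pos rest 1 n0 (Or.inl rfl), pvSplitD_dash]
      simp only [List.headD_cons, List.length_cons, List.length_nil, List.tail_cons,
        List.all_nil, Nat.add_zero, Bool.and_true]
      rw [Bool.eq_iff_iff]
      simp only [Bool.and_eq_true]
      tauto
    · cases hsp : pvSplitD rest with
      | nil => exact absurd hsp (pvSplitD_ne_nil rest)
      | cons p ps =>
        rw [pvAltLoop_char c rest 0 n0 hc, if_pos rfl, pvSplitD_char c rest hc p ps hsp]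
        simp only [List.headD_cons, List.length_cons, List.tail_cons]
        cases hl : pvLet c with
        | true =>
          rw [if_pos rfl, ih (n0 + 1), hsp]
          simp only [List.headD_cons, List.tail_cons, List.all_cons, hl, Bool.true_and]
          simp only [show n0 + (p.length + 1) = n0 + 1 + p.length from by omega]
          rfl
        | false =>
          rw [if_neg (by simp [hl])]
          have : (c :: p).all pvLet = false := by simp [List.all_cons, hl]
          simp [this]

lemma pv_go_eq (fuel : Nat) : ∀ (cs cur : List Char) (acc : List (List Char)) (_ : cs.length < fuel),
    PySem.Chars.splitOn.go ['-'] fuel cs cur acc =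
      acc.reverse ++ (match pvSplitD cs with
        | [] => []
        | p :: ps => (cur.reverse ++ p) :: ps) := by
  induction fuel with
  | zero => intro cs cur acc h; omega
  | succ f ih =>
    intro cs cur acc h
    cases cs with
    | nil => simp [PySem.Chars.splitOn.go, pvSplitD]
    | cons c rest =>
      rw [PySem.Chars.splitOn.go]
      by_cases hc : c = '-'
      · subst hc
        simp only [List.isPrefixOf, BEq.rfl, Bool.true_and, List.isPrefixOf_nil_left, if_pos]
        rw [ih _ _ _ (by simpa using Nat.lt_of_succ_lt_succ h)]
        simp [pvSplitD]
        cases hsp : pvSplitD rest with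
        | nil => exact absurd hsp (pvSplitD_ne_nil rest)
        | cons p ps => simp
      · have hpre : (['-'].isPrefixOf (c :: rest)) = false := by
          simp [List.isPrefixOf]
          exact fun hh => absurd hh.symm hc
        rw [if_neg (by simp [hpre])]
        rw [ih _ _ _ (by simpa using Nat.lt_of_succ_lt_succ h)]
        simp only [pvSplitD, if_neg hc]
        cases hsp : pvSplitD rest with
        | nil => exact absurd hsp (pvSplitD_ne_nil rest)
        | cons p ps => simp

lemma pvSplitOn_eq (cs : List Char) :
    PySem.Chars.splitOn cs ['-'] = pvSplitD cs := by
  rw [PySem.Chars.splitOn, pv_go_eq _ _ _ _ (by omega)]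
  cases hsp : pvSplitD cs with
  | nil => exact absurd hsp (pvSplitD_ne_nil cs)
  | cons p ps => simp

lemma pvSplitD_no_dash (cs : List Char) (h : '-' ∉ cs) : pvSplitD cs = [cs] := by
  induction cs with
  | nil => rfl
  | cons c rest ih =>
    simp only [List.mem_cons, not_or] at h
    simp only [pvSplitD, if_neg (Ne.symm h.1)]
    rw [ih h.2]

lemma char_eq_iff_toNat (a b : Char) : a = b ↔ a.toNat = b.toNat := by
  constructor
  · intro h; rw [h]
  · intro h; exact Char.ext (UInt32.toNat_inj.mp h)

lemma pv_letter_bridge (c : Char) :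
    PySem.Chars.isIn [c] pvAsciiLetters = pvLet c := by
  rw [Bool.eq_iff_iff, PySem.Chars.isIn_iff_infix, List.singleton_infix_iff]
  simp only [pvAsciiLetters, pvLet, List.mem_cons, List.not_mem_nil, or_false, char_eq_iff_toNat,
    PySem.Chars.isalpha, PySem.Chars.isupper, PySem.Chars.islower, Char.le_def,
    Bool.and_eq_true, Bool.or_eq_true, decide_eq_true_eq, UInt32.le_iff_toNat_le]
  simp
  omega

lemma pv_alnum_bridge (c : Char) :
    (PySem.Chars.isIn [c] pvAsciiLetters || PySem.Chars.isIn [c] pvDigitChars) = pvAl c := by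
  rw [Bool.eq_iff_iff]
  rw [Bool.or_eq_true, PySem.Chars.isIn_iff_infix, PySem.Chars.isIn_iff_infix,
    List.singleton_infix_iff, List.singleton_infix_iff]
  simp only [pvAsciiLetters, pvDigitChars, pvAl, List.mem_cons, List.not_mem_nil, or_false,
    char_eq_iff_toNat, PySem.Chars.isalpha, PySem.Chars.isupper, PySem.Chars.islower,
    PySem.Chars.isdigit, Char.le_def, Bool.and_eq_true, Bool.or_eq_true, decide_eq_true_eq,
    UInt32.le_iff_toNat_le]
  simp
  omega

lemma pv_testPart1_eq (p : List Char) :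
    pvTestPart1 p = (decide (2 ≤ p.length ∧ p.length ≤ 3) && p.all pvLet) := by
  unfold pvTestPart1
  have hall : p.all (fun x => PySem.Chars.isIn [x] pvAsciiLetters) = p.all pvLet := by
    simp only [pv_letter_bridge]
  split_ifs with h
  · simp [h, hall]
  · simp [h]

lemma pv_testPart2_eq (p : List Char) : pvTestPart2 p = pvP2B p := by
  unfold pvTestPart2 pvP2B
  simp only [pv_alnum_bridge]

lemma pv_main (lang : String) : is_RFC3066_py lang = is_RFC3066_py_alt lang := by
  unfold is_RFC3066_py is_RFC3066_py_alt
  by_cases hnil : lang.toList = []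
  · simp [hnil]
  · rw [if_neg hnil, if_neg hnil]
    by_cases hin : PySem.Chars.isIn ['-'] lang.toList = false
    · rw [if_pos hin]
      have hno : '-' ∉ lang.toList := by
        rw [PySem.Chars.isIn_eq_false_iff, List.singleton_infix_iff] at hin
        exact hin
      rw [pv_loop_zero, pvSplitD_no_dash _ hno, pv_testPart1_eq]
      simp
    · rw [if_neg hin]
      rw [pv_loop_zero, pvSplitOn_eq]
      cases hsp : pvSplitD lang.toList with
      | nil => exact absurd hsp (pvSplitD_ne_nil _)
      | cons p ps =>
        simp only [List.headD_cons, List.tail_cons, List.drop_one, pv_testPart1_eq]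
        rw [show pvTestPart2 = pvP2B from funext pv_testPart2_eq]
        rw [Bool.eq_iff_iff]
        split_ifs with h3 hX
        · simp only [List.length_cons] at h3
          simp only [false_iff, Bool.and_eq_true, decide_eq_true_eq, List.length_cons, not_and]
          intro h _
          omega
        · simp only [false_iff, Bool.and_eq_true, decide_eq_true_eq, Nat.zero_add, not_and]
          intro h _
          rcases Bool.and_eq_false_iff.mp hX with h1 | h1
          · exact absurd h.2.1 (of_decide_eq_false h1)
          · rw [h.2.2] at h1; simp at h1
        · simp only [List.length_cons, Nat.lt_iff_add_one_le, not_lt] at h3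
          rw [Bool.not_eq_false, Bool.and_eq_true, decide_eq_true_eq] at hX
          simp only [Bool.and_eq_true, decide_eq_true_eq, List.length_cons, Nat.zero_add]
          constructor
          · intro hy
            exact ⟨⟨by omega, hX.1, hX.2⟩, hy⟩
          · rintro ⟨-, hy⟩
            exact hy

-- ===== VERDICT (by name: the statement is the Claim_ definition above) =====
theorem is_RFC3066_py_spec : Claim_equal_is_RFC3066_py := by
  intro lang _
  unfold Spec_is_RFC3066_py
  exact pv_main lang
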